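-- pv_equiv track=rewrite | github.com/hammadm1254/FIX-Protocol-Example | fix_main.py | joinByTag
-- ===== SOURCE A (Python) =====
-- def verifyInput(tagName, tagValue, defList):
--     assert(type(tagName) == int or tagName is None), 'Tag names are integer values'
--     assert(type(tagValue) == str or tagValue is None), 'Tag values are strings'
--     assert(type(defList) == list and len(defList) > 0), 'List of transactions must not be empty'
--
-- def getDefByTagValue(tagName, tagValue, defList):
--     verifyInput(tagName, tagValue, defList)
--     return [definition for definition in defList if tagName in definition and definition[tagName] == tagValue]
--
-- def countValuesByTag(tagName, defList):
--     verifyInput(tagName, None, defList)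
--     resultDict = {}
--     for definition in defList:
--         if tagName in definition:
--             try:
--                 resultDict[definition[tagName]] += 1
--             except KeyError:
--                 resultDict[definition[tagName]] = 1
--     return resultDict
--
-- def joinByTag(innerTag, outerTag, defList):
--     verifyInput(innerTag, None, defList)
--     verifyInput(outerTag, None, defList)
--     outerTagTagValues = countValuesByTag(outerTag, defList).keys()
--     result = {}
--     for value in outerTagTagValues:
--         result[str(outerTag) + '=' + value] = countValuesByTag(innerTag, getDefByTagValue(outerTag, value, defList))
--     return result
-- ===== SOURCE B (Python) =====
-- def verifyInput(tagName, tagValue, defList):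
--     assert(type(tagName) == int or tagName is None), 'Tag names are integer values'
--     assert(type(tagValue) == str or tagValue is None), 'Tag values are strings'
--     assert(type(defList) == list and len(defList) > 0), 'List of transactions must not be empty'
--
-- def joinByTag(innerTag, outerTag, defList):
--     verifyInput(innerTag, None, defList)
--     verifyInput(outerTag, None, defList)
--     result = {}
--     for definition in defList:
--         if outerTag in definition:
--             key = str(outerTag) + '=' + definition[outerTag]
--             inner = result.setdefault(key, {})
--             if innerTag in definition:
--                 inner[definition[innerTag]] = inner.get(definition[innerTag], 0) + 1
--     return result
-- ===== Notes on version B (the rewrite author's own statement) =====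
-- stated objective: alternative
-- what changed: Replaces the per-outer-value re-filter-and-recount of the whole list with a single pass over defList that maintains a nested dict (outer key -> inner counter), creating the empty inner dict via setdefault so outer values with no inner hits still appear; it trades A's k extra scans for per-element dict updates.
import Mathlib
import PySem

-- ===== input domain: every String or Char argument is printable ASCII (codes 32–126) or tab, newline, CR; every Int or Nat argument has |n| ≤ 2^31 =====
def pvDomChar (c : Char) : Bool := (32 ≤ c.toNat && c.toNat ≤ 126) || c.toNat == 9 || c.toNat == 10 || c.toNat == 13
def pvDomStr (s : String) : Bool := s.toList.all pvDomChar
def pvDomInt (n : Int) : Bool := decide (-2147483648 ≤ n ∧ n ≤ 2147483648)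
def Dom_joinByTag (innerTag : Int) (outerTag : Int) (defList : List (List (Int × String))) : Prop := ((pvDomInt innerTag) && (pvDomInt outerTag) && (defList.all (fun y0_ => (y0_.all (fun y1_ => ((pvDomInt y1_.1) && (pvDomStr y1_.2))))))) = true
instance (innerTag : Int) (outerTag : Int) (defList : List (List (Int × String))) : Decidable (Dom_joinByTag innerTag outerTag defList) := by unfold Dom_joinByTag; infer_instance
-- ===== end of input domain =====

-- B replaces A's per-outer-value re-filter-and-recount with one pass maintaining a nested dict (alternative decomposition).

-- ===== PORT A =====
-- a Python definition (dict) as a PySem.Dict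
def pvDictOf (d : List (Int × String)) : PySem.Dict Int String := PySem.Dict.ofList d

-- countValuesByTag: for definition in defList: if tagName in definition: try += 1 except = 1
-- (the try/except increment-or-init is exactly Dict.modify v 0 (· + 1))
def pvCount (tagName : Int) (defList : List (List (Int × String))) : PySem.Dict String Int :=
  defList.foldl (fun r d =>
    match (pvDictOf d).get? tagName with
    | some v => r.modify v 0 (· + 1)
    | none => r) PySem.Dict.empty

-- getDefByTagValue: [d for d in defList if tagName in d and d[tagName] == tagValue]
def pvGetDefByTagValue (tagName : Int) (tagValue : String) (defList : List (List (Int × String))) : List (List (Int × String)) :=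
  defList.filter (fun d => (pvDictOf d).contains tagName && ((pvDictOf d).get? tagName == some tagValue))

def joinByTag (innerTag : Int) (outerTag : Int) (defList : List (List (Int × String))) : List (String × List (String × Int)) :=
  let outerTagTagValues := (pvCount outerTag defList).keys
  let result := outerTagTagValues.foldl (fun r value =>
    r.insert (PySem.Int.toStr outerTag ++ "=" ++ value) (pvCount innerTag (pvGetDefByTagValue outerTag value defList)))
    PySem.Dict.empty
  result.items.map (fun p => (p.1, p.2.items))

-- ===== PORT B =====
-- one pass: 'inner = result.setdefault(key, {}); inner[x] = inner.get(x, 0) + 1' — the aliased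
-- in-place mutation of the inner dict is ported as read (getD), update, write back (insert,
-- which for an existing key overwrites in place, exactly Python's aliasing behaviour)
def pvStepB (innerTag : Int) (outerTag : Int) (r : PySem.Dict String (PySem.Dict String Int)) (d : List (Int × String)) : PySem.Dict String (PySem.Dict String Int) :=
  match (pvDictOf d).get? outerTag with
  | none => r
  | some ov =>
    let key := PySem.Int.toStr outerTag ++ "=" ++ ov
    let inner := r.getD key PySem.Dict.empty
    let inner' :=
      match (pvDictOf d).get? innerTag with
      | some iv => inner.insert iv (inner.getD iv 0 + 1)
      | none => inner
    r.insert key inner'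

def joinByTag_alt (innerTag : Int) (outerTag : Int) (defList : List (List (Int × String))) : List (String × List (String × Int)) :=
  (defList.foldl (pvStepB innerTag outerTag) PySem.Dict.empty).items.map (fun p => (p.1, p.2.items))

-- ===== PRECONDITION & SPEC =====
-- A (and B) assert len(defList) > 0 and raise AssertionError on the empty list; Pre_ excludes exactly that.
def Pre_joinByTag (innerTag : Int) (outerTag : Int) (defList : List (List (Int × String))) : Prop := defList ≠ []
instance (innerTag : Int) (outerTag : Int) (defList : List (List (Int × String))) : Decidable (Pre_joinByTag innerTag outerTag defList) := by unfold Pre_joinByTag; infer_instance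
def pvWitness_joinByTag : Int × Int × (List (List (Int × String))) := (54, 49, [[(49, "A"), (54, "x")], [(49, "A")], [(49, "B"), (54, "x")]])

def Spec_joinByTag (innerTag : Int) (outerTag : Int) (defList : List (List (Int × String))) (out : List (String × List (String × Int))) : Prop := out = joinByTag_alt innerTag outerTag defList
instance (innerTag : Int) (outerTag : Int) (defList : List (List (Int × String))) (out : List (String × List (String × Int))) : Decidable (Spec_joinByTag innerTag outerTag defList out) := by unfold Spec_joinByTag; infer_instance

-- ===== CLAIM (what is proved, stated in full; the proofs are below) =====
def Claim_equal_joinByTag : Prop := ∀ (innerTag : Int) (outerTag : Int) (defList : List (List (Int × String))), Dom_joinByTag innerTag outerTag defList → Pre_joinByTag innerTag outerTag defList → Spec_joinByTag innerTag outerTag defList (joinByTag innerTag outerTag defList)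

-- ===== LEMMAS AND PROOFS =====

-- proof-side helpers
def pvOvs (outerTag : Int) (L : List (List (Int × String))) : List String :=
  L.filterMap (fun d => (pvDictOf d).get? outerTag)

def pvKey (outerTag : Int) (v : String) : String := PySem.Int.toStr outerTag ++ "=" ++ v

def pvPairs (innerTag outerTag : Int) (L : List (List (Int × String))) : List (String × Option String) :=
  L.filterMap (fun d => ((pvDictOf d).get? outerTag).map (fun ov => (ov, (pvDictOf d).get? innerTag)))

def pvInnerList (innerTag outerTag : Int) (v : String) (L : List (List (Int × String))) : List String :=
  (L.filter (fun d => (pvDictOf d).get? outerTag == some v)).filterMap (fun d => (pvDictOf d).get? innerTag)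

def pvUpdOpt (d : PySem.Dict String Int) (iv? : Option String) : PySem.Dict String Int :=
  match iv? with
  | some iv => d.insert iv (d.getD iv 0 + 1)
  | none => d

def pvStep2 (outerTag : Int) (r : PySem.Dict String (PySem.Dict String Int)) (p : String × Option String) : PySem.Dict String (PySem.Dict String Int) :=
  r.insert (pvKey outerTag p.1) (pvUpdOpt (r.getD (pvKey outerTag p.1) PySem.Dict.empty) p.2)

theorem pvKey_inj (t : Int) {v w : String} (h : pvKey t v = pvKey t w) : v = w := by
  have h2 := congrArg String.toList h
  simp only [pvKey, String.toList_append, List.append_cancel_left_eq] at h2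
  exact String.toList_inj.mp h2

theorem pvCount_eq_counter (tag : Int) (L : List (List (Int × String))) :
    pvCount tag L = PySem.Dict.counter (pvOvs tag L) := by
  rw [PySem.Dict.counter_eq_foldl]
  unfold pvCount pvOvs
  generalize PySem.Dict.empty = r
  induction L generalizing r with
  | nil => rfl
  | cons d L ih =>
    simp only [List.foldl_cons, List.filterMap_cons]
    cases (pvDictOf d).get? tag with
    | none => exact ih r
    | some v => simpa using ih (r.modify v 0 (· + 1))

theorem pvFoldB_eq_fold2 (innerTag outerTag : Int) (L : List (List (Int × String)))
    (r : PySem.Dict String (PySem.Dict String Int)) :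
    L.foldl (pvStepB innerTag outerTag) r = (pvPairs innerTag outerTag L).foldl (pvStep2 outerTag) r := by
  induction L generalizing r with
  | nil => rfl
  | cons d L ih =>
    simp only [List.foldl_cons, pvPairs, List.filterMap_cons]
    cases h : (pvDictOf d).get? outerTag with
    | none =>
      simp only [Option.map_none]
      rw [show pvStepB innerTag outerTag r d = r by simp [pvStepB, h]]
      exact ih r
    | some ov =>
      simp only [Option.map_some, List.foldl_cons]
      rw [show pvStepB innerTag outerTag r d = pvStep2 outerTag r (ov, (pvDictOf d).get? innerTag) by
        simp only [pvStepB, pvStep2, pvUpdOpt, pvKey, h]]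
      exact ih _

theorem pvPairs_fst (innerTag outerTag : Int) (L : List (List (Int × String))) :
    (pvPairs innerTag outerTag L).map (·.1) = pvOvs outerTag L := by
  induction L with
  | nil => rfl
  | cons d L ih =>
    simp only [pvPairs, pvOvs, List.filterMap_cons] at *
    cases (pvDictOf d).get? outerTag <;> simp_all

theorem pvSet_ofList_map {f : String → String} (hf : ∀ a b, f a = f b → a = b) (l : List String) :
    PySem.Set.ofList (l.map f) = (PySem.Set.ofList l).map f := by
  induction l using List.reverseRecOn with
  | nil => rfl
  | append_singleton l x ih =>
    rw [List.map_append, List.map_singleton, PySem.Set.ofList_append_singleton,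
        PySem.Set.ofList_append_singleton, ih, PySem.Set.add_eq_ite, PySem.Set.add_eq_ite]
    by_cases hx : x ∈ PySem.Set.ofList l
    · rw [if_pos hx, if_pos (List.mem_map_of_mem hx)]
    · rw [if_neg hx, if_neg (by simp only [List.mem_map]; rintro ⟨a, ha, hfa⟩; exact hx (hf a x hfa ▸ ha)),
          List.map_append, List.map_singleton]

theorem pvKeys_fold2 (outerTag : Int) (ps : List (String × Option String)) :
    (ps.foldl (pvStep2 outerTag) PySem.Dict.empty).keys = PySem.Set.ofList (ps.map (fun p => pvKey outerTag p.1)) := by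
  unfold pvStep2
  rw [PySem.Dict.keys_foldl_insert_key]
  simp [PySem.Dict.keys_empty, PySem.Set.update_nil_left]

theorem pvNodupKeys_fold2 (outerTag : Int) (ps : List (String × Option String)) :
    (ps.foldl (pvStep2 outerTag) PySem.Dict.empty).keys.Nodup := by
  unfold pvStep2
  exact PySem.Dict.nodup_keys_foldl_insert_key ps _ _ _ (by simp [PySem.Dict.nodup_keys_empty])

theorem pvGetD_fold2 (outerTag : Int) (v : String) (ps : List (String × Option String))
    (r : PySem.Dict String (PySem.Dict String Int)) :
    (ps.foldl (pvStep2 outerTag) r).getD (pvKey outerTag v) PySem.Dict.empty =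
      ((ps.filter (fun p => p.1 == v)).map (·.2)).foldl pvUpdOpt (r.getD (pvKey outerTag v) PySem.Dict.empty) := by
  induction ps generalizing r with
  | nil => rfl
  | cons p ps ih =>
    simp only [List.foldl_cons, List.filter_cons]
    by_cases hv : p.1 = v
    · rw [if_pos (by simp [hv]), List.map_cons, List.foldl_cons, ih]
      congr 1
      simp [pvStep2, hv, PySem.Dict.getD_insert_self]
    · rw [if_neg (by simp [hv]), ih]
      congr 1
      exact PySem.Dict.getD_insert_of_ne _ _ _ (fun h => hv (pvKey_inj outerTag h.symm))

theorem pvFoldUpdOpt_eq_counter (os : List (Option String)) :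
    os.foldl pvUpdOpt PySem.Dict.empty = PySem.Dict.counter (os.filterMap id) := by
  rw [← PySem.Dict.foldl_insert_getD_add_one_eq_counter]
  generalize PySem.Dict.empty = r
  induction os generalizing r with
  | nil => rfl
  | cons o os ih =>
    cases o with
    | none => simpa [pvUpdOpt] using ih r
    | some iv => simpa [pvUpdOpt] using ih (r.insert iv (r.getD iv 0 + 1))

theorem pvPairs_filter_snd (innerTag outerTag : Int) (v : String) (L : List (List (Int × String))) :
    (((pvPairs innerTag outerTag L).filter (fun p => p.1 == v)).map (·.2)).filterMap id =
      pvInnerList innerTag outerTag v L := by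
  induction L with
  | nil => rfl
  | cons d L ih =>
    simp only [pvPairs, pvInnerList, List.filterMap_cons, List.filter_cons] at *
    cases h : (pvDictOf d).get? outerTag with
    | none => simpa [h] using ih
    | some ov =>
      by_cases hv : ov = v
      · subst hv
        simp only [Option.map_some, List.filter_cons, beq_self_eq_true, if_pos, List.map_cons,
          List.filterMap_cons, h]
        cases hin : (pvDictOf d).get? innerTag <;> simp_all [pvInnerList]
      · simp only [Option.map_some, List.filter_cons]
        rw [if_neg (by simp [hv]), if_neg (by simp [h, hv])]
        exact ih

theorem pvFilter_eq (outerTag : Int) (v : String) (L : List (List (Int × String))) :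
    pvGetDefByTagValue outerTag v L = L.filter (fun d => (pvDictOf d).get? outerTag == some v) := by
  unfold pvGetDefByTagValue
  apply List.filter_congr
  intro d _
  cases h : (pvDictOf d).get? outerTag with
  | none => simp [PySem.Dict.contains_eq_isSome_get?, h]
  | some w => simp [PySem.Dict.contains_eq_isSome_get?, h]

theorem pvInnerA (innerTag outerTag : Int) (v : String) (L : List (List (Int × String))) :
    pvCount innerTag (pvGetDefByTagValue outerTag v L) = PySem.Dict.counter (pvInnerList innerTag outerTag v L) := by
  rw [pvCount_eq_counter, pvFilter_eq]
  rfl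

theorem pvA_items (innerTag outerTag : Int) (L : List (List (Int × String))) :
    joinByTag innerTag outerTag L =
      ((PySem.Set.ofList (pvOvs outerTag L)).map
        (fun v => (pvKey outerTag v, PySem.Dict.counter (pvInnerList innerTag outerTag v L)))).map
        (fun p => (p.1, p.2.items)) := by
  simp only [joinByTag]
  rw [pvCount_eq_counter, PySem.Dict.keys_counter]
  have hnd : ((PySem.Set.ofList (pvOvs outerTag L)).map (pvKey outerTag)).Nodup :=
    (PySem.Set.nodup_ofList _).map (fun a b h => pvKey_inj outerTag h)
  rw [show (PySem.Set.ofList (pvOvs outerTag L)).foldl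
      (fun r value => r.insert (PySem.Int.toStr outerTag ++ "=" ++ value)
        (pvCount innerTag (pvGetDefByTagValue outerTag value L))) PySem.Dict.empty
    = (PySem.Set.ofList (pvOvs outerTag L)).foldl
      (fun r value => r.insert (pvKey outerTag value)
        (pvCount innerTag (pvGetDefByTagValue outerTag value L))) PySem.Dict.empty from rfl]
  rw [PySem.Dict.items_foldl_insert_fresh _ _ _ _ (fun a _ => PySem.Dict.contains_empty _) hnd]
  have hemp : (PySem.Dict.empty : PySem.Dict String (PySem.Dict String Int)).items = [] := rfl
  rw [hemp, List.nil_append, List.map_map, List.map_map]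
  apply List.map_congr_left
  intro v _
  simp [pvInnerA]

theorem pvB_items (innerTag outerTag : Int) (L : List (List (Int × String))) :
    joinByTag_alt innerTag outerTag L =
      ((PySem.Set.ofList (pvOvs outerTag L)).map
        (fun v => (pvKey outerTag v, PySem.Dict.counter (pvInnerList innerTag outerTag v L)))).map
        (fun p => (p.1, p.2.items)) := by
  simp only [joinByTag_alt]
  rw [pvFoldB_eq_fold2]
  have hkeys : (((pvPairs innerTag outerTag L).foldl (pvStep2 outerTag) PySem.Dict.empty)).keys
      = (PySem.Set.ofList (pvOvs outerTag L)).map (pvKey outerTag) := by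
    rw [pvKeys_fold2]
    rw [show (pvPairs innerTag outerTag L).map (fun p => pvKey outerTag p.1)
        = ((pvPairs innerTag outerTag L).map (·.1)).map (pvKey outerTag) by simp]
    rw [pvPairs_fst, pvSet_ofList_map (fun a b h => pvKey_inj outerTag h)]
  rw [PySem.Dict.items_eq_map_keys _ (pvNodupKeys_fold2 outerTag _) PySem.Dict.empty, hkeys]
  simp only [List.map_map]
  congr 1
  funext v
  simp only [Function.comp_apply]
  rw [pvGetD_fold2, PySem.Dict.getD_empty, pvFoldUpdOpt_eq_counter, pvPairs_filter_snd]

-- ===== VERDICT (by name: the statement is the Claim_ definition above) =====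
theorem joinByTag_spec : Claim_equal_joinByTag := by
  intro innerTag outerTag defList _ _
  unfold Spec_joinByTag
  rw [pvA_items, pvB_items]
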